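-- pv_equiv track=rewrite | github.com/power080900/coding_prac | LV0/Pushing_str.py | solution
-- ===== SOURCE A (Python) =====
-- def solution(A,B):
--     n = A * 2
--     B_idx = []
--     if B in n:
--         for i in range(len(n)):
--             if n[i:len(B)+i] == B[0:len(B)+i]:
--                 B_idx.append(i)
--         return len(B) - B_idx[-1]
--     return -1
-- ===== SOURCE B (Python) =====
-- def solution(A, B):
--     # KMP search for the last occurrence of B in A+A (no per-position slice copies).
--     s = A + A
--     m = len(B)
--     fail = [0] * m
--     k = 0
--     for i in range(1, m):
--         while k and B[i] != B[k]:
--             k = fail[k - 1]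
--         if B[i] == B[k]:
--             k += 1
--         fail[i] = k
--     last = -1
--     k = 0
--     for i in range(len(s)):
--         while k and s[i] != B[k]:
--             k = fail[k - 1]
--         if s[i] == B[k]:
--             k += 1
--         if k == m:
--             last = i - m + 1
--             k = fail[k - 1]
--     return m - last if last != -1 else -1
-- ===== Notes on version B (the rewrite author's own statement) =====
-- stated objective: faster
-- what changed: Replaces A's per-position slice-building scan of A*2 (comparing n[i:len(B)+i] slices at every i and collecting all match positions) with a KMP search: a failure table over B, then one linear scan of A+A keeping the last match.
-- outside the precondition, e.g. on solution('ab', ''): A returns -3, B raises IndexError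
import Mathlib
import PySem

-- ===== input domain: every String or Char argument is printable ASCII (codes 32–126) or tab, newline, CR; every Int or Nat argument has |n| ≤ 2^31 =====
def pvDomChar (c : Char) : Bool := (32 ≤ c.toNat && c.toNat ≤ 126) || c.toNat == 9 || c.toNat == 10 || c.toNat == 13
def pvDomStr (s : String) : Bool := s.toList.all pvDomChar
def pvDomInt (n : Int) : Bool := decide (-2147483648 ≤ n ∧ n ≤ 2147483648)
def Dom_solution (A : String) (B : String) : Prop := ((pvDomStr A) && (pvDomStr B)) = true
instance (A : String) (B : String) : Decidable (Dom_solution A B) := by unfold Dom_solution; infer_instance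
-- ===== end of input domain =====

-- B replaces A's per-position slice-compare loop over A*2 with a KMP search (failure
-- function + one left-to-right scan keeping the last match); same return value on Pre_.

-- ===== PORT A =====
def solution (A : String) (B : String) : Int :=
  let n : List Char := A.toList ++ A.toList          -- n = A * 2
  if PySem.Chars.isIn B.toList n then                 -- if B in n:
    let Bidx : List Int := (PySem.List.pyRange 0 (n.length : Int)).foldl
      (fun acc i =>
        if PySem.Chars.slice n (some i) (some ((B.toList.length : Int) + i))
           = PySem.Chars.slice B.toList (some 0) (some ((B.toList.length : Int) + i))
        then acc ++ [i] else acc) []                  -- B_idx.append(i)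
    match PySem.List.pyGet? Bidx (-1) with            -- B_idx[-1]
    | some j => (B.toList.length : Int) - j
    | none => 0                                       -- unreachable under Pre_solution (Python: IndexError)
  else -1

-- ===== PORT B =====
-- xs[i] for the in-range indices KMP uses (the 'none' default is unreachable: every
-- index this port passes is proved in range by the invariants below).
def kmpCharAt (l : List Char) (i : Int) : Char :=
  match PySem.List.pyGet? l i with
  | some c => c
  | none => 'a'

-- 'while k and c != B[k]: k = fail[k-1]' — fuel-bounded (fuel := starting k suffices,
-- since fail[k-1] < k for the failure table this port builds).
def kmpJump (p : List Char) (fail : List Nat) (c : Char) : Nat → Nat → Nat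
  | 0, k => k
  | fuel + 1, k =>
    if k ≠ 0 ∧ c ≠ kmpCharAt p (k : Int) then kmpJump p fail c fuel (fail.getD (k - 1) 0)
    else k

-- body of 'for i in range(1, m)' building the failure table (st = (fail, k))
def kmpFailStep (p : List Char) (st : List Nat × Nat) (i : Int) : List Nat × Nat :=
  let k1 := kmpJump p st.1 (kmpCharAt p i) st.2 st.2                     -- while loop
  let k2 := if kmpCharAt p i = kmpCharAt p (k1 : Int) then k1 + 1 else k1   -- if B[i] == B[k]
  (st.1.set i.toNat k2, k2)                                              -- fail[i] = k (i ≥ 1 here, .toNat exact)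

-- body of 'for i in range(len(s))' (st = (last, k))
def kmpScanStep (p s : List Char) (fail : List Nat) (m : Nat) (st : Int × Nat) (i : Int) : Int × Nat :=
  let k1 := kmpJump p fail (kmpCharAt s i) st.2 st.2                     -- while loop
  let k2 := if kmpCharAt s i = kmpCharAt p (k1 : Int) then k1 + 1 else k1   -- if s[i] == B[k]
  if k2 = m then (i - (m : Int) + 1, fail.getD (k2 - 1) 0)               -- last = i-m+1; k = fail[k-1]
  else (st.1, k2)

def solution_alt (A : String) (B : String) : Int :=
  let s : List Char := A.toList ++ A.toList           -- s = A + A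
  let p : List Char := B.toList
  let m : Nat := p.length
  -- fail = [0]*m; for i in range(1, m): ...
  let fk : List Nat × Nat := (PySem.List.pyRange 1 (m : Int)).foldl (kmpFailStep p)
    (List.replicate m 0, 0)
  let fail := fk.1
  -- last = -1; k = 0; for i in range(len(s)): ...
  let res : Int × Nat := (PySem.List.pyRange 0 (s.length : Int)).foldl (kmpScanStep p s fail m)
    (-1, 0)
  if res.1 ≠ -1 then (m : Int) - res.1 else -1        -- return m - last if last != -1 else -1

-- ===== PRECONDITION & SPEC =====
-- Pre_ excludes the empty pattern B = "": a corner no caller specifies — A's value there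
-- (len(B) - (2*len(A)-1), IndexError for A = "") is an artefact of comparing B[0:i] slices,
-- and B's KMP raises IndexError on it (fail[-1] on an empty table).
def Pre_solution (A : String) (B : String) : Prop := B ≠ ""
instance (A : String) (B : String) : Decidable (Pre_solution A B) := by unfold Pre_solution; infer_instance
def pvWitness_solution : String × String := ("ab", "b")

def Spec_solution (A : String) (B : String) (out : Int) : Prop := out = solution_alt A B
instance (A : String) (B : String) (out : Int) : Decidable (Spec_solution A B out) := by unfold Spec_solution; infer_instance

-- ===== CLAIM (what is proved, stated in full; the proofs are below) =====
def Claim_equal_solution : Prop := ∀ (A : String) (B : String), Dom_solution A B → Pre_solution A B → Spec_solution A B (solution A B)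
-- ===== LEMMAS AND PROOFS =====


-- spec-side notions (used only by the proofs)
-- greatest l ≤ b with p.take l a suffix of t
def sfxFG (p t : List Char) (b : Nat) : Nat := Nat.findGreatest (fun l => p.take l <:+ t) b
-- greatest proper border length of p.take k
def bmax (p : List Char) (k : Nat) : Nat := sfxFG p (p.take k) (k - 1)
-- greatest e ≤ |t| (e > 0) such that p ends at position e in t; 0 if p does not occur in t
def eMax (p t : List Char) : Nat := Nat.findGreatest (fun e => 0 < e ∧ p <:+ t.take e) t.length

theorem findGreatest_congr' (P Q : Nat → Prop) [DecidablePred P] [DecidablePred Q] (n : Nat)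
    (h : ∀ l, l ≤ n → (P l ↔ Q l)) : Nat.findGreatest P n = Nat.findGreatest Q n := by
  induction n with
  | zero => rfl
  | succ n ih =>
      rw [Nat.findGreatest_succ, Nat.findGreatest_succ]
      by_cases hP : P (n + 1)
      · rw [if_pos hP, if_pos ((h (n + 1) le_rfl).mp hP)]
      · rw [if_neg hP, if_neg (fun hQ => hP ((h (n + 1) le_rfl).mpr hQ))]
        exact ih (fun l hl => h l (Nat.le_succ_of_le hl))

theorem suffix_of_suffix_length_le {u v w : List Char} (hu : u <:+ w) (hv : v <:+ w)
    (h : u.length ≤ v.length) : u <:+ v := by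
  rw [← List.reverse_prefix] at hu hv ⊢
  exact List.prefix_of_prefix_length_le hu hv (by simpa using h)

theorem kmpCharAt_eq (l : List Char) (i : Nat) (h : i < l.length) :
    kmpCharAt l (i : Int) = l[i] := by
  have := PySem.List.pyGet?_eq_some_getElem (xs := l) (i := (i : Int)) (by positivity)
    (by exact_mod_cast h)
  unfold kmpCharAt
  rw [this]
  simp

theorem snoc_suffix_snoc (u t : List Char) (x c : Char) :
    (u ++ [x]) <:+ (t ++ [c]) ↔ x = c ∧ u <:+ t := by
  rw [← List.reverse_prefix]
  simp only [List.reverse_append, List.reverse_singleton, List.singleton_append,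
    List.cons_prefix_cons, List.reverse_prefix]

theorem take_suffix_snoc_iff (p t : List Char) (c : Char) (l : Nat) (h1 : 1 ≤ l)
    (h2 : l ≤ p.length) :
    (p.take l <:+ t ++ [c]) ↔ (p.take (l - 1) <:+ t ∧ p[l - 1]'(by omega) = c) := by
  obtain ⟨l, rfl⟩ : ∃ l', l' + 1 = l := ⟨l - 1, by omega⟩
  have htake : p.take (l + 1) = p.take l ++ [p[l]'(by omega)] := by
    rw [List.take_succ, List.getElem?_eq_getElem (by omega)]
    rfl
  rw [htake]
  simp only [Nat.add_sub_cancel]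
  rw [snoc_suffix_snoc]
  tauto

theorem sfxFG_le (p t : List Char) (b : Nat) : sfxFG p t b ≤ b := Nat.findGreatest_le b

theorem sfxFG_suffix (p t : List Char) (b : Nat) : p.take (sfxFG p t b) <:+ t :=
  Nat.findGreatest_spec (P := fun l => p.take l <:+ t) (Nat.zero_le b)
    (show p.take 0 <:+ t by simp)

theorem le_sfxFG (p t : List Char) (b l : Nat) (hl : l ≤ b) (h : p.take l <:+ t) :
    l ≤ sfxFG p t b := Nat.le_findGreatest hl h

theorem bmax_le (p : List Char) (k : Nat) : bmax p k ≤ k - 1 := sfxFG_le _ _ _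

theorem bmax_suffix (p : List Char) (k : Nat) : p.take (bmax p k) <:+ p.take k :=
  sfxFG_suffix _ _ _

theorem le_bmax (p : List Char) (k l : Nat) (hl : l ≤ k - 1) (h : p.take l <:+ p.take k) :
    l ≤ bmax p k := le_sfxFG _ _ _ _ hl h

-- the while loop reaches the greatest l ≤ k with p.take l a suffix of t and p[l] = c (or 0)
theorem kmpJump_spec (p : List Char) (fail : List Nat) (t : List Char) (c : Char)
    (k : Nat) : ∀ (fuel : Nat), k ≤ fuel → k < p.length →
    (∀ j, 1 ≤ j → j ≤ k → fail.getD (j - 1) 0 = bmax p j) →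
    p.take k <:+ t →
    (kmpJump p fail c fuel k ≤ k ∧ kmpJump p fail c fuel k < p.length ∧
     p.take (kmpJump p fail c fuel k) <:+ t ∧
     (kmpJump p fail c fuel k = 0 ∨ c = kmpCharAt p (kmpJump p fail c fuel k : Int)) ∧
     (∀ l, l ≤ k → p.take l <:+ t → c = kmpCharAt p (l : Int) → l ≤ kmpJump p fail c fuel k)) := by
  intro fuel
  induction fuel generalizing k with
  | zero =>
      intro hk hkm hfail hsuf
      have hk0 : k = 0 := by omega
      subst hk0
      exact ⟨le_rfl, hkm, by simp [kmpJump], Or.inl (by simp [kmpJump]), fun l hl _ _ => hl⟩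
  | succ fuel ih =>
      intro hk hkm hfail hsuf
      by_cases h : k ≠ 0 ∧ c ≠ kmpCharAt p (k : Int)
      · have heq : kmpJump p fail c (fuel + 1) k = kmpJump p fail c fuel (fail.getD (k - 1) 0) := by
          rw [kmpJump, if_pos h]
        have hfk : fail.getD (k - 1) 0 = bmax p k := hfail k (by omega) le_rfl
        have hk'le : fail.getD (k - 1) 0 ≤ k - 1 := by rw [hfk]; exact bmax_le p k
        have hsuf' : p.take (fail.getD (k - 1) 0) <:+ t := by
          rw [hfk]; exact (bmax_suffix p k).trans hsuf
        obtain ⟨h1, h2, h3, h4, h5⟩ := ih (fail.getD (k - 1) 0) (by omega) (by omega)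
          (fun j hj1 hj2 => hfail j hj1 (by omega)) hsuf'
        rw [heq]
        refine ⟨by omega, h2, h3, h4, ?_⟩
        intro l hl hsufl hc
        by_cases hlk : l = k
        · exact absurd (hlk ▸ hc) h.2
        · have hlt : l < k := by omega
          have hlen : (p.take l).length ≤ (p.take k).length := by
            simp only [List.length_take]
            omega
          have hbord : p.take l <:+ p.take k := suffix_of_suffix_length_le hsufl hsuf hlen
          exact h5 l (by rw [hfk]; exact le_bmax p k l (by omega) hbord) hsufl hc
      · have heq : kmpJump p fail c (fuel + 1) k = k := by rw [kmpJump, if_neg h]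
        rw [heq]
        push_neg at h
        refine ⟨le_rfl, hkm, hsuf, ?_, fun l hl _ _ => hl⟩
        by_cases hk0 : k = 0
        · exact Or.inl hk0
        · exact Or.inr (h hk0)

-- one iteration of the scan body advances sfxFG by one text character
theorem kmpStep_spec (p : List Char) (fail : List Nat) (t : List Char) (c : Char)
    (bound : Nat) (hb : bound + 1 ≤ p.length)
    (hfail : ∀ j, 1 ≤ j → j ≤ bound → fail.getD (j - 1) 0 = bmax p j) :
    (if c = kmpCharAt p ((kmpJump p fail c (sfxFG p t bound) (sfxFG p t bound)) : Int)
     then kmpJump p fail c (sfxFG p t bound) (sfxFG p t bound) + 1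
     else kmpJump p fail c (sfxFG p t bound) (sfxFG p t bound))
    = sfxFG p (t ++ [c]) (bound + 1) := by
  have hk_le : sfxFG p t bound ≤ bound := sfxFG_le p t bound
  have hkm : sfxFG p t bound < p.length := by omega
  obtain ⟨h1, h2, h3, h4, h5⟩ := kmpJump_spec p fail t c (sfxFG p t bound)
    (sfxFG p t bound) le_rfl hkm (fun j hj1 hj2 => hfail j hj1 (hj2.trans hk_le))
    (sfxFG_suffix p t bound)
  set J := kmpJump p fail c (sfxFG p t bound) (sfxFG p t bound) with hJ
  by_cases hc : c = kmpCharAt p (J : Int)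
  · rw [if_pos hc]
    apply le_antisymm
    · apply le_sfxFG _ _ _ _ (by omega)
      rw [take_suffix_snoc_iff p t c (J + 1) (by omega) (by omega)]
      refine ⟨by simpa using h3, ?_⟩
      have hcc := kmpCharAt_eq p J h2
      simp only [Nat.add_sub_cancel]
      rw [← hcc]
      exact hc.symm
    · set E := sfxFG p (t ++ [c]) (bound + 1) with hE
      by_cases hE0 : E = 0
      · omega
      · have hPE : p.take E <:+ t ++ [c] := sfxFG_suffix p (t ++ [c]) (bound + 1)
        have hEle : E ≤ bound + 1 := sfxFG_le p (t ++ [c]) (bound + 1)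
        rw [take_suffix_snoc_iff p t c E (by omega) (by omega)] at hPE
        obtain ⟨hs, hchar⟩ := hPE
        have hE1k : E - 1 ≤ sfxFG p t bound := le_sfxFG p t bound (E - 1) (by omega) hs
        have hEJ : E - 1 ≤ J :=
          h5 (E - 1) hE1k hs (by rw [kmpCharAt_eq p (E - 1) (by omega)]; exact hchar.symm)
        omega
  · rw [if_neg hc]
    have hJ0 : J = 0 := by
      rcases h4 with h | h
      · exact h
      · exact absurd h hc
    rw [hJ0]
    symm
    unfold sfxFG
    rw [Nat.findGreatest_eq_zero_iff]
    intro l hl0 hlb hP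
    rw [take_suffix_snoc_iff p t c l (by omega) (by omega)] at hP
    obtain ⟨hs, hchar⟩ := hP
    have hlk : l - 1 ≤ sfxFG p t bound := le_sfxFG p t bound (l - 1) (by omega) hs
    have hlJ : l - 1 ≤ J :=
      h5 (l - 1) hlk hs (by rw [kmpCharAt_eq p (l - 1) (by omega)]; exact hchar.symm)
    have hl1 : l = 1 := by omega
    apply hc
    rw [hJ0, kmpCharAt_eq p 0 (by omega)]
    subst hl1
    simpa using hchar.symm


theorem sfxFG_nil (p : List Char) (hp : p ≠ []) (b : Nat) : sfxFG p [] b = 0 := by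
  unfold sfxFG
  rw [Nat.findGreatest_eq_zero_iff]
  intro l hl0 hlb h
  have : p.take l = [] := List.suffix_nil.mp h
  rw [List.take_eq_nil_iff] at this
  rcases this with h' | h'
  · omega
  · exact hp h'

-- invariant of the failure-table loop: after i iterations the table holds bmax p (j)
theorem kmpFail_inv (p : List Char) (i : Nat) (hi : i + 1 ≤ p.length) :
    ((List.range i).foldl (fun st (k : Nat) => kmpFailStep p st (1 + (k : Int)))
        (List.replicate p.length 0, 0)).1.length = p.length ∧
    ((List.range i).foldl (fun st (k : Nat) => kmpFailStep p st (1 + (k : Int)))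
        (List.replicate p.length 0, 0)).2 = bmax p (i + 1) ∧
    (∀ j, 1 ≤ j → j ≤ i + 1 →
      ((List.range i).foldl (fun st (k : Nat) => kmpFailStep p st (1 + (k : Int)))
        (List.replicate p.length 0, 0)).1.getD (j - 1) 0 = bmax p j) := by
  induction i with
  | zero =>
      refine ⟨by simp, rfl, ?_⟩
      intro j hj1 hj2
      have hj : j = 1 := by omega
      subst hj
      simp [List.getD, List.getElem?_replicate]
      cases Nat.eq_zero_or_pos p.length with
      | inl h => simp [h]; rfl
      | inr h => simp [h]; rfl
  | succ i ih =>
      obtain ⟨hlen, hk, hj⟩ := ih (by omega)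
      rw [List.range_succ, List.foldl_append, List.foldl_cons, List.foldl_nil]
      set st := (List.range i).foldl (fun st (k : Nat) => kmpFailStep p st (1 + (k : Int)))
        (List.replicate p.length 0, 0) with hst
      have hcast : (1 : Int) + (i : Int) = ((i + 1 : Nat) : Int) := by push_cast; ring
      have hchar : kmpCharAt p (1 + (i : Int)) = p[i + 1]'(by omega) := by
        rw [hcast, kmpCharAt_eq p (i + 1) (by omega)]
      have hst2 : st.2 = sfxFG p (p.take (i + 1)) i := by
        rw [hk]; unfold bmax; simp
      have hstep := kmpStep_spec p st.1 (p.take (i + 1)) (p[i + 1]'(by omega)) i (by omega)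
        (fun j hj1 hj2 => hj j hj1 (by omega))
      have htake : p.take (i + 1) ++ [p[i + 1]'(by omega)] = p.take (i + 2) := by
        conv_rhs => rw [show i + 2 = i + 1 + 1 from rfl, List.take_succ]
        rw [List.getElem?_eq_getElem (by omega)]
        rfl
      rw [htake] at hstep
      have hb2 : sfxFG p (p.take (i + 2)) (i + 1) = bmax p (i + 2) := by
        unfold bmax; simp
      rw [hb2] at hstep
      simp only [kmpFailStep]
      rw [hchar, hst2, hstep]
      have htn : ((1 : Int) + (i : Int)).toNat = i + 1 := by omega
      rw [htn]
      refine ⟨by simp [hlen], rfl, ?_⟩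
      intro j hj1 hj2
      by_cases hje : j - 1 = i + 1
      · have hj' : j = i + 2 := by omega
        subst hj'
        simp only [List.getD, show i + 2 - 1 = i + 1 from rfl]
        rw [List.getElem?_set]
        simp [hlen, show i + 1 < p.length by omega]
      · have hj2' : j ≤ i + 1 := by omega
        simp only [List.getD] at hj ⊢
        rw [List.getElem?_set, if_neg (by omega)]
        exact hj j hj1 hj2'

-- invariant of the scan loop: k = sfxFG, last = last match end (as eMax)
theorem kmpScan_inv (p s : List Char) (fail : List Nat) (hp : p ≠ [])
    (hfail : ∀ j, 1 ≤ j → j ≤ p.length → fail.getD (j - 1) 0 = bmax p j)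
    (i : Nat) (hi : i ≤ s.length) :
    ((List.range i).foldl (fun st (k : Nat) => kmpScanStep p s fail p.length st ((k : Nat) : Int)) (-1, 0)).2
      = sfxFG p (s.take i) (p.length - 1) ∧
    ((List.range i).foldl (fun st (k : Nat) => kmpScanStep p s fail p.length st ((k : Nat) : Int)) (-1, 0)).1
      = (if eMax p (s.take i) = 0 then (-1 : Int)
         else ((eMax p (s.take i) : Int) - (p.length : Int))) := by
  have hm1 : 1 ≤ p.length := List.length_pos_of_ne_nil hp
  induction i with
  | zero =>
      refine ⟨?_, ?_⟩
      · simp [sfxFG_nil p hp]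
      · simp [eMax]
  | succ i ih =>
      obtain ⟨hk, hlast⟩ := ih (by omega)
      rw [List.range_succ, List.foldl_append, List.foldl_cons, List.foldl_nil]
      set st := (List.range i).foldl (fun st (k : Nat) => kmpScanStep p s fail p.length st ((k : Nat) : Int))
        (-1, 0) with hst
      have hchar : kmpCharAt s (i : Int) = s[i]'(by omega) := kmpCharAt_eq s i (by omega)
      have hstep := kmpStep_spec p fail (s.take i) (s[i]'(by omega)) (p.length - 1)
        (by omega) (fun j hj1 hj2 => hfail j hj1 (by omega))
      have htake : s.take i ++ [s[i]'(by omega)] = s.take (i + 1) := by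
        rw [List.take_succ, List.getElem?_eq_getElem (by omega)]
        rfl
      rw [htake] at hstep
      have hmm : p.length - 1 + 1 = p.length := by omega
      rw [hmm] at hstep
      have ht'len : (s.take (i + 1)).length = i + 1 := by
        simp [List.length_take]
        omega
      have htlen : (s.take i).length = i := by
        simp [List.length_take]
        omega
      simp only [kmpScanStep]
      rw [hchar, hk, hstep]
      by_cases hk2 : sfxFG p (s.take (i + 1)) p.length = p.length
      · rw [if_pos hk2]
        have hPm : p <:+ s.take (i + 1) := by
          have := (Nat.findGreatest_eq_iff.mp hk2).2.1 (by omega)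
          rw [List.take_length] at this
          exact this
        have hE : eMax p (s.take (i + 1)) = i + 1 := by
          unfold eMax
          rw [ht'len]
          apply le_antisymm (Nat.findGreatest_le _)
          apply Nat.le_findGreatest le_rfl
          refine ⟨by omega, ?_⟩
          rw [List.take_of_length_le (by omega)]
          exact hPm
        refine ⟨?_, ?_⟩
        · show fail.getD (sfxFG p (s.take (i + 1)) p.length - 1) 0
            = sfxFG p (s.take (i + 1)) (p.length - 1)
          rw [hk2, hfail p.length (by omega) le_rfl]
          unfold bmax
          rw [List.take_length]
          unfold sfxFG
          apply findGreatest_congr'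
          intro l hl
          constructor
          · intro h
            exact h.trans hPm
          · intro h
            exact suffix_of_suffix_length_le h hPm (by rw [List.length_take]; omega)
        · show ((i : Int) - (p.length : Int) + 1)
            = if eMax p (s.take (i + 1)) = 0 then (-1 : Int)
              else ((eMax p (s.take (i + 1)) : Int) - (p.length : Int))
          rw [hE, if_neg (by omega)]
          push_cast
          ring
      · rw [if_neg hk2]
        have hnot : ¬ p <:+ s.take (i + 1) := by
          intro h
          apply hk2
          apply le_antisymm (sfxFG_le _ _ _)
          apply le_sfxFG _ _ _ _ le_rfl
          rw [List.take_length]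
          exact h
        refine ⟨?_, ?_⟩
        · show sfxFG p (s.take (i + 1)) p.length = sfxFG p (s.take (i + 1)) (p.length - 1)
          conv_lhs => rw [show p.length = p.length - 1 + 1 by omega]
          unfold sfxFG
          rw [Nat.findGreatest_succ, if_neg (by rw [hmm, List.take_length]; exact hnot)]
        · show st.1 = if eMax p (s.take (i + 1)) = 0 then (-1 : Int)
              else ((eMax p (s.take (i + 1)) : Int) - (p.length : Int))
          have hEeq : eMax p (s.take (i + 1)) = eMax p (s.take i) := by
            unfold eMax
            rw [ht'len, htlen, Nat.findGreatest_succ]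
            rw [if_neg]
            · apply findGreatest_congr'
              intro e he
              have h1 : (s.take (i + 1)).take e = s.take e := by
                rw [List.take_take]
                congr 1
                omega
              have h2 : (s.take i).take e = s.take e := by
                rw [List.take_take]
                congr 1
                omega
              rw [h1, h2]
            · rintro ⟨-, h⟩
              rw [List.take_of_length_le (by omega)] at h
              exact hnot h
          rw [hEeq]
          exact hlast

-- occurrence of p at position j of s, rephrased as p ending at position j + |p|
theorem prefix_drop_suffix_take (p s : List Char) (hp : p ≠ []) (j : Nat)
    (h : p <+: s.drop j) : j + p.length ≤ s.length ∧ p <:+ s.take (j + p.length) := by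
  obtain ⟨r, hr⟩ := h
  have hlen : p.length + r.length = s.length - j := by
    have := congrArg List.length hr
    simpa using this
  have hj : j ≤ s.length := by
    by_contra hj
    have : s.drop j = [] := List.drop_eq_nil_of_le (by omega)
    rw [this] at hr
    have := congrArg List.length hr
    simp at this
    exact hp (by simpa using this.1)
  refine ⟨by omega, ?_⟩
  have : s.take (j + p.length) = s.take j ++ p := by
    rw [List.take_add]
    congr 1
    rw [← hr, List.take_left]
  rw [this]
  exact ⟨s.take j, rfl⟩

theorem suffix_take_prefix_drop (p s : List Char) (e : Nat) (he : e ≤ s.length)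
    (h : p <:+ s.take e) : p.length ≤ e ∧ p <+: s.drop (e - p.length) := by
  obtain ⟨u, hu⟩ := h
  have hlen : u.length + p.length = e := by
    have := congrArg List.length hu
    simp [List.length_take] at this
    omega
  refine ⟨by omega, ?_⟩
  have hdrop : s.drop (e - p.length) = p ++ s.drop e := by
    conv_lhs => rw [← List.take_append_drop e s]
    rw [List.drop_append_of_le_length (by rw [List.length_take]; omega)]
    congr 1
    rw [← hu, show e - p.length = u.length by omega, List.drop_left]
  rw [hdrop]
  exact ⟨s.drop e, rfl⟩

theorem le_eMax_of_ne_zero (p s : List Char) (h : eMax p s ≠ 0) :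
    p.length ≤ eMax p s ∧ eMax p s ≤ s.length := by
  unfold eMax at h ⊢
  rw [Ne, Nat.findGreatest_eq_zero_iff] at h
  push_neg at h
  obtain ⟨l, hl0, hlb, hP⟩ := h
  have hPe := Nat.findGreatest_spec (P := fun e => 0 < e ∧ p <:+ s.take e) hlb hP
  refine ⟨?_, Nat.findGreatest_le _⟩
  have h1 := hPe.2.length_le
  have h2 : (s.take (Nat.findGreatest (fun e => 0 < e ∧ p <:+ s.take e) s.length)).length
      ≤ Nat.findGreatest (fun e => 0 < e ∧ p <:+ s.take e) s.length := by
    rw [List.length_take]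
    omega
  exact h1.trans h2

theorem eMax_eq_zero_of_no_occ (p s : List Char) (hp : p ≠ [])
    (h : ∀ j, ¬ p <+: s.drop j) : eMax p s = 0 := by
  unfold eMax
  rw [Nat.findGreatest_eq_zero_iff]
  intro e he0 heb hP
  exact h (e - p.length) (suffix_take_prefix_drop p s e heb hP.2).2

-- B's value, summarized through eMax
theorem solution_alt_eq (A B : String) (hb : B.toList ≠ []) :
    solution_alt A B = (if eMax B.toList (A.toList ++ A.toList) = 0 then (-1 : Int)
      else (B.toList.length : Int)
        - ((eMax B.toList (A.toList ++ A.toList) : Int) - (B.toList.length : Int))) := by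
  have hm1 : 1 ≤ B.toList.length := List.length_pos_of_ne_nil hb
  simp only [solution_alt]
  rw [PySem.List.pyRange_one, List.foldl_map,
    show (((B.toList.length : Int) - 1).toNat) = B.toList.length - 1 by omega]
  obtain ⟨hlen, -, hj⟩ := kmpFail_inv B.toList (B.toList.length - 1) (by omega)
  rw [PySem.List.pyRange_zero_natCast, List.foldl_map]
  obtain ⟨-, hlast⟩ := kmpScan_inv B.toList (A.toList ++ A.toList) _ hb
    (fun j h1 h2 => hj j h1 (by omega)) (A.toList ++ A.toList).length le_rfl
  rw [List.take_length] at hlast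
  rw [hlast]
  by_cases hE : eMax B.toList (A.toList ++ A.toList) = 0
  · simp [hE]
  · obtain ⟨hge, -⟩ := le_eMax_of_ne_zero B.toList (A.toList ++ A.toList) hE
    have hne : ((eMax B.toList (A.toList ++ A.toList) : Int) - (B.toList.length : Int)) ≠ -1 := by
      omega
    simp only [if_neg hE]
    rw [if_pos hne]


-- the slice comparison in A's loop tests exactly "B is a prefix of n[k:]"
theorem cond_iff (nn bb : List Char) (k : Nat) :
    (PySem.Chars.slice nn (some (k : Int)) (some ((bb.length : Int) + (k : Int)))
      = PySem.Chars.slice bb (some 0) (some ((bb.length : Int) + (k : Int))))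
      ↔ bb <+: nn.drop k := by
  have hcast : ((bb.length : Int) + (k : Int)) = ((bb.length + k : Nat) : Int) := by push_cast; ring
  rw [hcast]
  simp only [PySem.Chars.slice_eq_listSlice, PySem.List.slice_zero_start,
    PySem.List.slice_natCast, PySem.List.slice_to_natCast]
  have h1 : bb.length + k - k = bb.length := by omega
  have h2 : bb.take (bb.length + k) = bb := List.take_of_length_le (by omega)
  rw [h1, h2]
  constructor
  · intro h; rw [← h]; exact List.take_prefix _ _
  · rintro ⟨t, ht⟩; rw [← ht]; exact List.take_left

-- last element of the indices of range n passing q, given K is the greatest passing index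
theorem getLast?_filter_range (q : Nat → Bool) (n K : Nat) (hK : K < n) (hq : q K = true)
    (hmax : ∀ m, K < m → m < n → q m = false) :
    ((List.range n).filter q).getLast? = some K := by
  induction n with
  | zero => omega
  | succ n ih =>
      rw [List.range_succ, List.filter_append]
      by_cases hKn : K = n
      · subst hKn
        simp [hq]
      · have hqn : q n = false := hmax n (by omega) (by omega)
        rw [List.filter_cons_of_neg (by simp [hqn]), List.filter_nil, List.append_nil]
        exact ih (by omega) (fun m hm hm' => hmax m hm (by omega))

-- ===== VERDICT (by name: the statement is the Claim_ definition above) =====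
theorem solution_spec : Claim_equal_solution := by
  intro A B _ hpre
  unfold Spec_solution
  have hbne : B.toList ≠ [] := by
    intro h
    apply hpre
    have := congrArg String.ofList h
    simpa using this
  rw [solution_alt_eq A B hbne]
  unfold solution
  set nn : List Char := A.toList ++ A.toList with hnn
  set bb : List Char := B.toList with hbb
  have hm1 : 1 ≤ bb.length := List.length_pos_of_ne_nil hbne
  by_cases hin : PySem.Chars.isIn bb nn = true
  · -- B occurs in n = A*2
    simp only [hin, if_true]
    obtain ⟨j, hj⟩ : ∃ j, bb <+: nn.drop j :=
      (PySem.Chars.exists_prefix_drop_iff_isIn bb nn).mpr hin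
    set P : Nat → Prop := fun k => bb <+: nn.drop k with hP
    have hjlt : j < nn.length := by
      by_contra h
      have : nn.drop j = [] := List.drop_eq_nil_of_le (by omega)
      rw [this] at hj
      exact hbne (List.prefix_nil.mp hj)
    set K : Nat := Nat.findGreatest P nn.length with hKdef
    have hPK : P K := Nat.findGreatest_spec (le_of_lt hjlt) hj
    have hKlt : K < nn.length := by
      rcases Nat.lt_or_ge K nn.length with h | h
      · exact h
      · exfalso
        have : nn.drop K = [] := List.drop_eq_nil_of_le h
        rw [hP] at hPK; rw [this] at hPK
        exact hbne (List.prefix_nil.mp hPK)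
    -- A's side: the collected list is the filtered range, its last element is K
    rw [PySem.List.pyRange_zero_natCast,
        PySem.List.foldl_append_ite_eq_filter
          (p := fun i => PySem.Chars.slice nn (some i) (some ((bb.length : Int) + i))
              = PySem.Chars.slice bb (some 0) (some ((bb.length : Int) + i))),
        List.nil_append, List.filter_map]
    have hfc : List.filter ((fun i => decide (PySem.Chars.slice nn (some i) (some ((bb.length : Int) + i))
              = PySem.Chars.slice bb (some 0) (some ((bb.length : Int) + i)))) ∘ (fun k : Nat => (k : Int)))
            (List.range nn.length)
        = List.filter (fun k : Nat => decide (P k)) (List.range nn.length) := by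
      apply List.filter_congr
      intro k _
      simp only [Function.comp]
      rw [decide_eq_decide]
      exact cond_iff nn bb k
    rw [hfc]
    have hlast : ((List.range nn.length).filter (fun k : Nat => decide (P k))).getLast? = some K :=
      getLast?_filter_range _ _ _ hKlt (by simpa using hPK)
        (fun m hm hm' => by simpa using Nat.findGreatest_is_greatest hm (le_of_lt hm'))
    rw [PySem.List.pyGet?_neg_one, List.getLast?_map, hlast, Option.map_some]
    -- B's side: eMax bb nn = K + bb.length
    obtain ⟨hKm, hsufK⟩ := prefix_drop_suffix_take bb nn hbne K hPK
    have hge : K + bb.length ≤ eMax bb nn := by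
      unfold eMax
      exact Nat.le_findGreatest hKm ⟨by omega, hsufK⟩
    have hPe : 0 < eMax bb nn ∧ bb <:+ nn.take (eMax bb nn) := by
      unfold eMax
      exact Nat.findGreatest_spec (P := fun e => 0 < e ∧ bb <:+ nn.take e) hKm ⟨by omega, hsufK⟩
    have hle2 : eMax bb nn ≤ nn.length := by
      unfold eMax
      exact Nat.findGreatest_le _
    obtain ⟨hme, hpd⟩ := suffix_take_prefix_drop bb nn (eMax bb nn) hle2 hPe.2
    have hKge : eMax bb nn - bb.length ≤ K := Nat.le_findGreatest (by omega) hpd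
    have heq : eMax bb nn = K + bb.length := by omega
    rw [heq, if_neg (by omega)]
    push_cast
    ring
  · -- B does not occur in n
    have hin' : PySem.Chars.isIn bb nn = false := by
      cases h : PySem.Chars.isIn bb nn
      · rfl
      · exact absurd h hin
    simp only [hin', Bool.false_eq_true, if_false]
    have hno : ∀ k, ¬ bb <+: nn.drop k := fun k hk =>
      hin ((PySem.Chars.exists_prefix_drop_iff_isIn bb nn).mp ⟨k, hk⟩)
    rw [eMax_eq_zero_of_no_occ bb nn hbne hno]
    simp
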